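-- pv_equiv track=rewrite | github.com/aaro888-icefalcon/Equilibrium | emergence/engine/sim/action_resolver.py | _skill_proficiency
-- ===== SOURCE A (Python) =====
-- def _skill_proficiency(skill_uses: int) -> int:
--     """Convert skill use count to proficiency level (0-10)."""
--     thresholds = [5, 20, 60, 150, 350, 750, 1500, 3000, 7000, 15000]
--     level = 0
--     for t in thresholds:
--         if skill_uses >= t:
--             level += 1
--         else:
--             break
--     return level
-- ===== SOURCE B (Python) =====
-- import bisect
--
-- _THRESHOLDS = [5, 20, 60, 150, 350, 750, 1500, 3000, 7000, 15000]
--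
-- def _skill_proficiency(skill_uses: int) -> int:
--     """Convert skill use count to proficiency level (0-10)."""
--     return bisect.bisect_right(_THRESHOLDS, skill_uses)
-- ===== Notes on version B (the rewrite author's own statement) =====
-- stated objective: idiomatic
-- what changed: The early-breaking linear scan with a counter is replaced by bisect.bisect_right over the sorted threshold table (binary search), with no loop or branch in the function.
import Mathlib
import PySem

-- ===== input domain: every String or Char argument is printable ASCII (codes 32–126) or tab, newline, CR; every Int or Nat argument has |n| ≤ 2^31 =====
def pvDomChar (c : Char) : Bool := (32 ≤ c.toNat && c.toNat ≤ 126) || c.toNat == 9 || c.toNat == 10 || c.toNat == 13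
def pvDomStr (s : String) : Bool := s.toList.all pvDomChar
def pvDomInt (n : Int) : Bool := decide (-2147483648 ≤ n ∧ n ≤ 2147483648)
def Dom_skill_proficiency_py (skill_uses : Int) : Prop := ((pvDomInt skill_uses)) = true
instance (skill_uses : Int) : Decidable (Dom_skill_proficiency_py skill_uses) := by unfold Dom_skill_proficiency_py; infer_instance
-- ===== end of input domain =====

-- B replaces A's early-breaking linear scan over the threshold table by bisect.bisect_right
-- (binary search) on the same sorted table; objective: more idiomatic, no loop or branch.

-- ===== PORT A =====
-- the for-loop with break: recurse over the list, stop at the first threshold not reached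
def pvLoopA (x : Int) : List Int → Int → Int
  | [], level => level
  | t :: ts, level => if x ≥ t then pvLoopA x ts (level + 1) else level

def skill_proficiency_py (skill_uses : Int) : Int :=
  pvLoopA skill_uses [5, 20, 60, 150, 350, 750, 1500, 3000, 7000, 15000] 0

-- ===== PORT B =====
-- transliteration of CPython's bisect.bisect_right: binary search on [lo, hi)
def pvBisectRight (xs : List Int) (x : Int) (lo hi : Nat) : Nat :=
  if lo < hi then
    let mid := (lo + hi) / 2
    if x < xs.getD mid 0 then pvBisectRight xs x lo mid
    else pvBisectRight xs x (mid + 1) hi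
  else lo
  termination_by hi - lo
  decreasing_by all_goals omega

def pvThresholds : List Int := [5, 20, 60, 150, 350, 750, 1500, 3000, 7000, 15000]

def skill_proficiency_py_alt (skill_uses : Int) : Int :=
  (pvBisectRight pvThresholds skill_uses 0 pvThresholds.length : Int)

-- ===== PRECONDITION & SPEC =====
def Spec_skill_proficiency_py (skill_uses : Int) (out : Int) : Prop := out = skill_proficiency_py_alt skill_uses
instance (skill_uses : Int) (out : Int) : Decidable (Spec_skill_proficiency_py skill_uses out) := by unfold Spec_skill_proficiency_py; infer_instance

-- ===== CLAIM (what is proved, stated in full; the proofs are below) =====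
def Claim_equal_skill_proficiency_py : Prop := ∀ (skill_uses : Int), Dom_skill_proficiency_py skill_uses → Spec_skill_proficiency_py skill_uses (skill_proficiency_py skill_uses)

-- ===== LEMMAS AND PROOFS =====

-- ===== VERDICT (by name: the statement is the Claim_ definition above) =====
theorem skill_proficiency_py_spec : Claim_equal_skill_proficiency_py := by
  intro x _
  unfold Spec_skill_proficiency_py skill_proficiency_py skill_proficiency_py_alt pvThresholds
  simp only [pvLoopA, List.length]
  norm_num
  repeat (rw [pvBisectRight.eq_def]; norm_num)
  split_ifs <;> omega
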